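-- pv_equiv track=rewrite | github.com/2811907609/lixiang_code_clone | codebuddy/ai_agents/ai_agents/modules/haloos_auto_workflow/auto_increase_coverage_sop.py | check_coverage_no_increase_after_max
-- ===== SOURCE A (Python) =====
-- def check_coverage_no_increase_after_max(lst, N):
--     if not lst or N <= 0:
--         return True
--
--     max_val = max(lst)
--     first_max_index = lst.index(max_val)
--     count = 0
--
--     for num in lst[first_max_index + 1:]:
--         if num > max_val:
--             # 出现比最大值更大的，重置最大值和计数
--             max_val = num
--             count = 0
--         else:
--             count += 1
--             if count >= N:
--                 return False
--     return True
-- ===== SOURCE B (Python) =====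
-- def check_coverage_no_increase_after_max(lst, N):
--     # Simpler: nothing after the first maximum can exceed it, so the loop in A
--     # just counts trailing elements; replace it with a closed-form comparison.
--     if not lst or N <= 0:
--         return True
--     first_max_index = lst.index(max(lst))
--     return len(lst) - first_max_index - 1 < N
-- ===== Notes on version B (the rewrite author's own statement) =====
-- stated objective: simpler
-- what changed: Replaced the counting loop over the tail after the first maximum with the closed-form comparison len(lst) - first_max_index - 1 < N (no element after the first maximum can exceed it, so the loop only counts).
import Mathlib
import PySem

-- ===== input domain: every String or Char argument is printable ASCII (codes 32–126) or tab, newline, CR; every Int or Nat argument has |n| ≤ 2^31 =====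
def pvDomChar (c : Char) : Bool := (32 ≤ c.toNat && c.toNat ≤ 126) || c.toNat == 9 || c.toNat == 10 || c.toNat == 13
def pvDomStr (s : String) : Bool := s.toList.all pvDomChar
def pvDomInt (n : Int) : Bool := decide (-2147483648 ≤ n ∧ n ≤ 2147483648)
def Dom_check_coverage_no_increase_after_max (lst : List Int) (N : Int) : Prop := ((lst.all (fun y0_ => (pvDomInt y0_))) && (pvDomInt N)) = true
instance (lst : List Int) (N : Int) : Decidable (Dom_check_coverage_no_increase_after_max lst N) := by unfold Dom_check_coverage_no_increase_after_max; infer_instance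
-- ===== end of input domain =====

-- B replaces A's counting loop over the tail after the first maximum by the
-- closed-form comparison len(lst) - first_max_index - 1 < N (simpler; same cost).

-- ===== PORT A =====
-- A's for-loop over lst[first_max_index+1:] with state (max_val, count) and early return False
def pvALoop (xs : List Int) (max_val : Int) (count : Int) (N : Int) : Bool :=
  match xs with
  | [] => true
  | num :: rest =>
    if num > max_val then
      pvALoop rest num 0 N
    else
      if count + 1 ≥ N then false
      else pvALoop rest max_val (count + 1) N

def check_coverage_no_increase_after_max (lst : List Int) (N : Int) : Bool :=
  if lst = [] ∨ N ≤ 0 then true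
  else
    match PySem.List.max? lst (fun y => y) with
    | none => true  -- unreachable: lst ≠ []
    | some max_val =>
      match PySem.List.index? lst max_val with
      | none => true  -- unreachable: max_val ∈ lst
      | some first_max_index =>
        pvALoop (PySem.List.slice lst (some ((first_max_index : Int) + 1)) none) max_val 0 N

-- ===== PORT B =====
def check_coverage_no_increase_after_max_alt (lst : List Int) (N : Int) : Bool :=
  if lst = [] ∨ N ≤ 0 then true
  else
    match PySem.List.max? lst (fun y => y) with
    | none => true  -- unreachable: lst ≠ []
    | some max_val =>
      match PySem.List.index? lst max_val with
      | none => true  -- unreachable: max_val ∈ lst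
      | some first_max_index =>
        decide ((lst.length : Int) - (first_max_index : Int) - 1 < N)

-- ===== PRECONDITION & SPEC =====
def Spec_check_coverage_no_increase_after_max (lst : List Int) (N : Int) (out : Bool) : Prop := out = check_coverage_no_increase_after_max_alt lst N
instance (lst : List Int) (N : Int) (out : Bool) : Decidable (Spec_check_coverage_no_increase_after_max lst N out) := by unfold Spec_check_coverage_no_increase_after_max; infer_instance

-- ===== CLAIM (what is proved, stated in full; the proofs are below) =====
def Claim_equal_check_coverage_no_increase_after_max : Prop := ∀ (lst : List Int) (N : Int), Dom_check_coverage_no_increase_after_max lst N → Spec_check_coverage_no_increase_after_max lst N (check_coverage_no_increase_after_max lst N)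

-- ===== LEMMAS AND PROOFS =====
-- On a tail whose elements never exceed max_val, A's loop only counts: it
-- returns true iff count + length < N (given the invariant count < N).
theorem pvALoop_count (xs : List Int) (m c N : Int)
    (hle : ∀ x ∈ xs, x ≤ m) (hc : c < N) :
    pvALoop xs m c N = decide (c + (xs.length : Int) < N) := by
  induction xs generalizing c with
  | nil => simp [pvALoop, hc]
  | cons num rest ih =>
    have hnum : num ≤ m := hle num (by simp)
    have hle' : ∀ x ∈ rest, x ≤ m := fun x hx => hle x (by simp [hx])
    simp only [pvALoop, if_neg (by omega : ¬ num > m)]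
    by_cases h : c + 1 ≥ N
    · rw [if_pos h]
      symm
      rw [decide_eq_false_iff_not]
      simp only [List.length_cons]
      push_cast
      omega
    · rw [if_neg h, ih _ hle' (by omega)]
      rw [decide_eq_decide]
      simp only [List.length_cons]
      push_cast
      omega

-- ===== VERDICT (by name: the statement is the Claim_ definition above) =====
theorem check_coverage_no_increase_after_max_spec : Claim_equal_check_coverage_no_increase_after_max := by
  intro lst N _
  unfold Spec_check_coverage_no_increase_after_max
  unfold check_coverage_no_increase_after_max check_coverage_no_increase_after_max_alt
  by_cases hguard : lst = [] ∨ N ≤ 0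
  · simp [hguard]
  · rw [if_neg hguard, if_neg hguard]
    rw [not_or] at hguard
    obtain ⟨hne, hN⟩ := hguard
    obtain ⟨m, hm⟩ : ∃ m, PySem.List.max? lst (fun y => y) = some m := by
      cases h : PySem.List.max? lst (fun y => y) with
      | none => exact absurd ((PySem.List.max?_eq_none_iff lst (fun y => y)).mp h) hne
      | some m => exact ⟨m, rfl⟩
    simp only [hm]
    have hmem : m ∈ lst := PySem.List.max?_mem hm
    obtain ⟨i, hi⟩ : ∃ i, PySem.List.index? lst m = some i := by
      cases h : PySem.List.index? lst m with
      | none => exact absurd ((PySem.List.index?_eq_none_iff lst m).mp h) (not_not_intro hmem)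
      | some i => exact ⟨i, rfl⟩
    simp only [hi]
    have hilt : i < lst.length := by
      obtain ⟨hk, _, _⟩ := PySem.List.getElem_of_index?_eq_some hi
      exact hk
    have hslice : PySem.List.slice lst (some ((i : Int) + 1)) none = lst.drop (i + 1) := by
      have : ((i : Int) + 1) = ((i + 1 : Nat) : Int) := by push_cast; ring
      rw [this, PySem.List.slice_from_natCast]
    rw [hslice]
    have hmax : ∀ x ∈ lst.drop (i + 1), x ≤ m := fun x hx =>
      PySem.List.max?_isMax hm x (List.mem_of_mem_drop hx)
    rw [pvALoop_count _ _ _ _ hmax (by omega), decide_eq_decide,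
        List.length_drop, Nat.cast_sub (by omega : i + 1 ≤ lst.length)]
    push_cast
    omega
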